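-- pv_equiv track=rewrite | github.com/WindBellYura/Research | Match/0308/streamlit/pages/🔧Loop_Extractor.py | extract_between_empty_lines
-- ===== SOURCE A (Python) =====
-- def extract_between_empty_lines(code_lines):
--     extracted_content = []
--     empty_line_count = 0
--
--     for line in code_lines:
--         if line.strip() == "":
--             empty_line_count += 1
--             if empty_line_count == 1:  # 第一个空行
--                 extracted_content = []  # 清空已提取的内容
--         else:
--             if empty_line_count == 2:  # 第二个空行
--                 break
--             elif empty_line_count == 1:  # 在两个空行之间
--                 extracted_content.append(line)
--
--         # 排除第一行
--     if len(extracted_content) > 1: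
--         extracted_content = extracted_content[1:-1]
--
--     return extracted_content
-- ===== SOURCE B (Python) =====
-- def extract_between_empty_lines(code_lines):
--     lines = list(code_lines)
--     empties = [i for i, line in enumerate(lines) if line.strip() == ""]
--     if not empties:
--         return []
--     start = empties[0]
--     end = empties[1] if len(empties) >= 2 else len(lines)
--     block = lines[start + 1:end]
--     return block[1:-1] if len(block) > 1 else block
-- ===== Notes on version B (the rewrite author's own statement) =====
-- stated objective: simpler
-- what changed: Replaces A's stateful counter-and-break scan with: collect the indices of empty lines once, slice the list between the first empty index and the second (or the end), then apply the same len>1 trim.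
import Mathlib
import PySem

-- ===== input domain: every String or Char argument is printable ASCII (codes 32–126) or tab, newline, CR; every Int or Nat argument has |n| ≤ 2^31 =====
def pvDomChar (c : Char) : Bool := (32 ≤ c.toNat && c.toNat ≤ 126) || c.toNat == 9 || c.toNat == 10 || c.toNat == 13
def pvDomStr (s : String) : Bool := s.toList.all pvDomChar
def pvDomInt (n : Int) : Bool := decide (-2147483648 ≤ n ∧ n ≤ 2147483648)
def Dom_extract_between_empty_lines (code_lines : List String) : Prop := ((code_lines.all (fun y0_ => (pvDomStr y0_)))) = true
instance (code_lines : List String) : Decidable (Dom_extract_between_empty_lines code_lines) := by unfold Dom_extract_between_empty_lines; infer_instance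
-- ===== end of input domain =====

-- B replaces A's stateful counter-and-break scan by: collect the empty-line indices, slice between
-- the first and second (or end), then the same len>1 trim (objective: simpler decomposition).

-- ===== PORT A =====
-- the final 'xs[1:-1] if len(xs) > 1 else xs' trim, literally the same line in both Pythons
def pvTrim (xs : List String) : List String :=
  if xs.length > 1 then PySem.List.slice xs (some 1) (some (-1)) else xs

-- the for-loop of A: state = (extracted_content, empty_line_count); break = early return
def pvGoA : List String → List String → Nat → List String
  | [], acc, _ => acc
  | line :: rest, acc, cnt =>
    if PySem.Str.strip line == "" then
      pvGoA rest (if cnt + 1 == 1 then [] else acc) (cnt + 1)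
    else
      if cnt == 2 then acc
      else if cnt == 1 then pvGoA rest (acc ++ [line]) cnt
      else pvGoA rest acc cnt

def extract_between_empty_lines (code_lines : List String) : List String :=
  pvTrim (pvGoA code_lines [] 0)

-- ===== PORT B =====
def extract_between_empty_lines_alt (code_lines : List String) : List String :=
  match ((PySem.List.enumerate code_lines).filter (fun p => PySem.Str.strip p.2 == "")).map (·.1) with
  | [] => []
  | start :: restE =>
    pvTrim (PySem.List.slice code_lines (some (start + 1))
      (some (match restE with | e2 :: _ => e2 | [] => PySem.List.len code_lines)))

-- ===== PRECONDITION & SPEC =====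
def Spec_extract_between_empty_lines (code_lines : List String) (out : List String) : Prop := out = extract_between_empty_lines_alt code_lines
instance (code_lines : List String) (out : List String) : Decidable (Spec_extract_between_empty_lines code_lines out) := by unfold Spec_extract_between_empty_lines; infer_instance

-- ===== CLAIM (what is proved, stated in full; the proofs are below) =====
def Claim_equal_extract_between_empty_lines : Prop := ∀ (code_lines : List String), Dom_extract_between_empty_lines code_lines → Spec_extract_between_empty_lines code_lines (extract_between_empty_lines code_lines)

-- ===== LEMMAS AND PROOFS =====

-- "the line is non-empty after strip" — the predicate both programs scan with
def pvNE (s : String) : Bool := !(PySem.Str.strip s == "")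

-- the common core value: the lines strictly between the first empty line and the next one (or the end)
def pvCore (l : List String) : List String := ((l.dropWhile pvNE).drop 1).takeWhile pvNE

theorem pvGoA_ge2 (l : List String) : ∀ (acc : List String) (cnt : Nat), 2 ≤ cnt → pvGoA l acc cnt = acc := by
  induction l with
  | nil => intro acc cnt _; rfl
  | cons x rest ih =>
    intro acc cnt h
    simp only [pvGoA]
    split
    · have h1 : (cnt + 1 == 1) = false := by simp; omega
      rw [h1]
      simpa using ih _ _ (by omega)
    · have h2 : ¬ cnt == 1 := by simp; omega
      by_cases hc : cnt == 2
      · simp [hc]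
      · simp [hc, h2]; exact ih _ _ h

theorem pvGoA_one (l : List String) : ∀ (acc : List String), pvGoA l acc 1 = acc ++ l.takeWhile pvNE := by
  induction l with
  | nil => intro acc; simp [pvGoA]
  | cons x rest ih =>
    intro acc
    simp only [pvGoA]
    by_cases hx : PySem.Str.strip x == ""
    · simp [hx, pvGoA_ge2, pvNE]
    · simp [hx, pvNE, ih]

theorem pvGoA_zero (l : List String) : pvGoA l [] 0 = pvCore l := by
  induction l with
  | nil => rfl
  | cons x rest ih =>
    simp only [pvGoA]
    by_cases hx : PySem.Str.strip x == ""
    · simp [hx, pvGoA_one, pvCore, pvNE]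
    · simp [hx, ih, pvCore, pvNE]

-- the empty-line index list of B, characterised against takeWhile/dropWhile
theorem pvFemp (l : List String) : ∀ (s : Int),
    ((PySem.List.enumerate l s).filter (fun p => PySem.Str.strip p.2 == "")).map (·.1)
    = (match l.dropWhile pvNE with
       | [] => ([] : List Int)
       | _ :: t => (s + (l.takeWhile pvNE).length)
            :: ((PySem.List.enumerate t (s + (l.takeWhile pvNE).length + 1)).filter (fun p => PySem.Str.strip p.2 == "")).map (·.1)) := by
  induction l with
  | nil => intro s; rfl
  | cons x rest ih =>
    intro s
    rw [PySem.List.enumerate_cons]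
    by_cases hx : PySem.Str.strip x == ""
    · have hf : List.filter (fun p => PySem.Str.strip p.2 == "") ((s, x) :: PySem.List.enumerate rest (s + 1))
          = (s, x) :: List.filter (fun p => PySem.Str.strip p.2 == "") (PySem.List.enumerate rest (s + 1)) := by
        simp [hx]
      rw [hf, List.dropWhile_cons_of_neg (by simp [pvNE, hx]), List.takeWhile_cons_of_neg (by simp [pvNE, hx])]
      simp
    · have hf : List.filter (fun p => PySem.Str.strip p.2 == "") ((s, x) :: PySem.List.enumerate rest (s + 1))
          = List.filter (fun p => PySem.Str.strip p.2 == "") (PySem.List.enumerate rest (s + 1)) := by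
        simp [hx]
      rw [hf, ih (s + 1), List.dropWhile_cons_of_pos (by simp [pvNE, hx]),
        List.takeWhile_cons_of_pos (by simp [pvNE, hx])]
      cases hd : rest.dropWhile pvNE with
      | nil => rfl
      | cons y t =>
        simp only [List.length_cons]
        push_cast
        ring_nf

theorem pvMain (l : List String) : extract_between_empty_lines l = extract_between_empty_lines_alt l := by
  unfold extract_between_empty_lines extract_between_empty_lines_alt
  rw [pvGoA_zero, pvFemp]
  cases hd : l.dropWhile pvNE with
  | nil => simp [pvCore, hd, pvTrim]
  | cons y t =>
    have hsplit : l = l.takeWhile pvNE ++ y :: t := by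
      rw [← hd, List.takeWhile_append_dropWhile]
    set k := (l.takeWhile pvNE).length with hk
    have hdrop : l.drop (k + 1) = t := by
      conv_lhs => rw [hsplit]
      rw [← List.drop_drop, List.drop_left]
      rfl
    have hcore : pvCore l = t.takeWhile pvNE := by
      simp [pvCore, hd]
    simp only [zero_add]
    cases hr : ((PySem.List.enumerate t ((k : Int) + 1)).filter (fun p => PySem.Str.strip p.2 == "")).map (·.1) with
    | nil =>
      -- no second empty line: slice to the end of the list
      have ht : t.dropWhile pvNE = [] := by
        rw [pvFemp] at hr
        cases h2 : t.dropWhile pvNE with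
        | nil => rfl
        | cons z u => rw [h2] at hr; simp at hr
      have htw : t.takeWhile pvNE = t := by
        conv_rhs => rw [← List.takeWhile_append_dropWhile (p := pvNE) (l := t), ht, List.append_nil]
      have hlen : l.length = k + 1 + t.length := by
        conv_lhs => rw [hsplit]
        simp [List.length_append]
        omega
      have hslice : PySem.List.slice l (some ((k : Int) + 1)) (some (PySem.List.len l)) = t := by
        have hcast : ((k : Int) + 1) = ((k + 1 : Nat) : Int) := by push_cast; ring
        rw [PySem.List.len_eq, hcast, PySem.List.slice_natCast, hdrop,
          List.take_of_length_le (by omega)]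
      rw [hslice, hcore, htw]
    | cons e2 r2 =>
      -- a second empty line exists, at index k+1+m
      rw [pvFemp] at hr
      cases h2 : t.dropWhile pvNE with
      | nil => rw [h2] at hr; simp at hr
      | cons z u =>
        rw [h2] at hr
        set m := (t.takeWhile pvNE).length with hm
        have he2 : e2 = (k : Int) + 1 + m := by
          have := (List.cons.injEq _ _ _ _).mp hr
          omega
        have hslice : PySem.List.slice l (some ((k : Int) + 1)) (some e2) = t.takeWhile pvNE := by
          have h1 : ((k : Int) + 1) = ((k + 1 : Nat) : Int) := by push_cast; ring
          have h2' : e2 = ((k + 1 + m : Nat) : Int) := by rw [he2]; push_cast; ring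
          rw [h1, h2', PySem.List.slice_natCast, hdrop]
          have hmm : k + 1 + m - (k + 1) = m := by omega
          rw [hmm]
          conv_lhs => rw [show t = t.takeWhile pvNE ++ t.dropWhile pvNE from (List.takeWhile_append_dropWhile ..).symm]
          rw [hm, List.take_left]
        rw [hslice, hcore]

-- ===== VERDICT (by name: the statement is the Claim_ definition above) =====
theorem extract_between_empty_lines_spec : Claim_equal_extract_between_empty_lines := by
  intro l _
  unfold Spec_extract_between_empty_lines
  exact pvMain l
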